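-- pv_equiv track=rewrite | github.com/D0n9-KG/LogicKG | backend/app/graph/neo4j_client.py | _split_prefixed_evidence_ids
-- ===== SOURCE A (Python) =====
-- def _split_prefixed_evidence_ids(ids: list[str]) -> dict[str, list[str]]:
--     out = {
--         "claim_ids": [],
--         "prop_ids": [],
--         "chunk_ids": [],
--         "event_ids": [],
--         "other_ids": [],
--     }
--     seen = {k: set() for k in out}
--     for raw in ids or []:
--         value = str(raw or "").strip()
--         if not value:
--             continue
--         if ":" in value:
--             prefix, payload = value.split(":", 1)
--             key = prefix.strip().upper()
--             payload = payload.strip()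
--         else:
--             key, payload = "", value
--         bucket = "other_ids"
--         if key == "CL":
--             bucket = "claim_ids"
--         elif key == "PR":
--             bucket = "prop_ids"
--         elif key == "CH":
--             bucket = "chunk_ids"
--         elif key == "EV":
--             bucket = "event_ids"
--         if payload and payload not in seen[bucket]:
--             seen[bucket].add(payload)
--             out[bucket].append(payload)
--     return out
-- ===== SOURCE B (Python) =====
-- _BUCKETS = ("claim_ids", "prop_ids", "chunk_ids", "event_ids", "other_ids")
-- _PREFIX_TO_BUCKET = {"CL": "claim_ids", "PR": "prop_ids", "CH": "chunk_ids", "EV": "event_ids"}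
--
--
-- def _parse_evidence_id(raw):
--     value = str(raw or "").strip()
--     if not value:
--         return None
--     if ":" in value:
--         prefix, payload = value.split(":", 1)
--         key, payload = prefix.strip().upper(), payload.strip()
--     else:
--         key, payload = "", value
--     if not payload:
--         return None
--     return _PREFIX_TO_BUCKET.get(key, "other_ids"), payload
--
--
-- def _split_prefixed_evidence_ids(ids: list[str]) -> dict[str, list[str]]:
--     parsed = [p for p in map(_parse_evidence_id, ids or []) if p is not None]
--     return {name: list(dict.fromkeys(pl for n, pl in parsed if n == name))
--             for name in _BUCKETS}
-- ===== Notes on version B (the rewrite author's own statement) =====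
-- stated objective: simpler
-- what changed: A single loop threading two mutable dicts (out lists plus per-bucket seen sets) is replaced by a pure per-element parser whose classified (bucket, payload) pairs feed five per-bucket comprehensions, each deduplicated once with dict.fromkeys; the bucket if-chain becomes a table lookup.
import Mathlib
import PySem

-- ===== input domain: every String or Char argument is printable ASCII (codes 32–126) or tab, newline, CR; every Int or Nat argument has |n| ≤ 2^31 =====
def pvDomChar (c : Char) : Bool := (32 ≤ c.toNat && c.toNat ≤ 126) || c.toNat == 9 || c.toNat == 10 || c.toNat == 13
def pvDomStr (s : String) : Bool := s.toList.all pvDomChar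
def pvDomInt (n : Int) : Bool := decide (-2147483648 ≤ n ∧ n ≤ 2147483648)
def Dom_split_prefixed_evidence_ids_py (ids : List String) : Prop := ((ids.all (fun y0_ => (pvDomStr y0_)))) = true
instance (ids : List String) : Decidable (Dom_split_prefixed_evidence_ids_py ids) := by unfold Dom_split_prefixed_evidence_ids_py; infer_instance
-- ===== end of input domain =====

-- B separates classification from bucket bookkeeping: a pure per-element parser feeding
-- per-bucket comprehensions with one ordered dedup each, instead of A's single loop
-- threading two mutable dicts (objective: simpler decomposition, no speed claim).

-- ===== PORT A =====
-- loop body of A, used by the fold below (state = (out, seen))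
def pvStepA (st : PySem.Dict String (List String) × PySem.Dict String (PySem.Set String))
    (raw : String) : PySem.Dict String (List String) × PySem.Dict String (PySem.Set String) :=
  let value := PySem.Str.strip raw
  if value = "" then st
  else
    let kp : String × String :=
      if PySem.Str.isIn ":" value then
        match PySem.Str.splitMax? value ":" 1 with
        | some (pre :: rest :: _) => (PySem.Str.upper (PySem.Str.strip pre), PySem.Str.strip rest)
        | _ => ("", value)   -- unreachable: a split on a separator that occurs yields ≥ 2 pieces
      else ("", value)
    let bucket :=
      if kp.1 == "CL" then "claim_ids"
      else if kp.1 == "PR" then "prop_ids"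
      else if kp.1 == "CH" then "chunk_ids"
      else if kp.1 == "EV" then "event_ids"
      else "other_ids"
    if kp.2 ≠ "" ∧ ¬ (PySem.Set.contains (st.2.getD bucket PySem.Set.empty) kp.2) then
      (st.1.modify bucket [] (· ++ [kp.2]),
       st.2.modify bucket PySem.Set.empty (fun s => PySem.Set.add s kp.2))
    else st

def split_prefixed_evidence_ids_py (ids : List String) : List (String × List String) :=
  let out0 : PySem.Dict String (List String) :=
    PySem.Dict.ofList [("claim_ids", []), ("prop_ids", []), ("chunk_ids", []), ("event_ids", []), ("other_ids", [])]
  let seen0 : PySem.Dict String (PySem.Set String) :=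
    PySem.Dict.ofList (out0.keys.map (fun k => (k, PySem.Set.empty)))
  (ids.foldl pvStepA (out0, seen0)).1.items

-- ===== PORT B =====
def pvParseEvidenceId (raw : String) : Option (String × String) :=
  let value := PySem.Str.strip raw
  if value = "" then none
  else
    let kp : String × String :=
      if PySem.Str.isIn ":" value then
        match PySem.Str.splitMax? value ":" 1 with
        | some (pre :: rest :: _) => (PySem.Str.upper (PySem.Str.strip pre), PySem.Str.strip rest)
        | _ => ("", value)   -- unreachable, as in port A
      else ("", value)
    if kp.2 = "" then none
    else
      some ((PySem.Dict.ofList [("CL", "claim_ids"), ("PR", "prop_ids"), ("CH", "chunk_ids"), ("EV", "event_ids")]).getD kp.1 "other_ids", kp.2)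

def split_prefixed_evidence_ids_py_alt (ids : List String) : List (String × List String) :=
  let parsed := (ids.map pvParseEvidenceId).filterMap id
  ["claim_ids", "prop_ids", "chunk_ids", "event_ids", "other_ids"].map
    (fun name => (name, PySem.List.dedup ((parsed.filter (fun p => p.1 == name)).map (·.2))))

-- ===== PRECONDITION & SPEC =====
def Spec_split_prefixed_evidence_ids_py (ids : List String) (out : List (String × List String)) : Prop := out = split_prefixed_evidence_ids_py_alt ids
instance (ids : List String) (out : List (String × List String)) : Decidable (Spec_split_prefixed_evidence_ids_py ids out) := by unfold Spec_split_prefixed_evidence_ids_py; infer_instance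

-- ===== CLAIM (what is proved, stated in full; the proofs are below) =====
def Claim_equal_split_prefixed_evidence_ids_py : Prop := ∀ (ids : List String), Dom_split_prefixed_evidence_ids_py ids → Spec_split_prefixed_evidence_ids_py ids (split_prefixed_evidence_ids_py ids)

-- ===== LEMMAS AND PROOFS =====

-- the loop state of A when both dicts carry the same five buckets
def pvMkSt (c p ch e o : List String) :
    PySem.Dict String (List String) × PySem.Dict String (PySem.Set String) :=
  (PySem.Dict.mk [("claim_ids", c), ("prop_ids", p), ("chunk_ids", ch), ("event_ids", e), ("other_ids", o)],
   PySem.Dict.mk [("claim_ids", c), ("prop_ids", p), ("chunk_ids", ch), ("event_ids", e), ("other_ids", o)])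

-- payloads l classifies into bucket n, in order, before dedup
def pvBp (l : List String) (n : String) : List String :=
  ((l.filterMap pvParseEvidenceId).filter (fun q => q.1 == n)).map (·.2)

lemma pvStepA_eq (c p ch e o : List String) (raw : String) :
    pvStepA (pvMkSt c p ch e o) raw =
      match pvParseEvidenceId raw with
      | none => pvMkSt c p ch e o
      | some (n, pay) =>
          if n == "claim_ids" then pvMkSt (PySem.Set.add c pay) p ch e o
          else if n == "prop_ids" then pvMkSt c (PySem.Set.add p pay) ch e o
          else if n == "chunk_ids" then pvMkSt c p (PySem.Set.add ch pay) e o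
          else if n == "event_ids" then pvMkSt c p ch (PySem.Set.add e pay) o
          else pvMkSt c p ch e (PySem.Set.add o pay) := by
  unfold pvStepA pvParseEvidenceId
  by_cases hv : PySem.Str.strip raw = ""
  · simp [hv]
  · simp only [hv, if_false]
    generalize (if PySem.Str.isIn ":" (PySem.Str.strip raw) then
        match PySem.Str.splitMax? (PySem.Str.strip raw) ":" 1 with
        | some (pre :: rest :: _) => (PySem.Str.upper (PySem.Str.strip pre), PySem.Str.strip rest)
        | _ => ("", PySem.Str.strip raw)
      else ("", PySem.Str.strip raw)) = kp
    by_cases hpay : kp.2 = ""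
    · simp [hpay, pvMkSt]
    · simp only [hpay, if_false]
      by_cases h1 : kp.1 == "CL"
      · have h1' : kp.1 = "CL" := by simpa using h1
        by_cases hm : kp.2 ∈ c <;> simp [h1', hm, PySem.Dict.ofList, PySem.Dict.update, PySem.Dict.getD, PySem.Dict.get?, PySem.Dict.insert, PySem.Dict.modify, PySem.Dict.contains, PySem.Dict.empty, pvMkSt, PySem.Set.add, PySem.Set.empty] <;> exact hpay
      by_cases h2 : kp.1 == "PR"
      · have h2' : kp.1 = "PR" := by simpa using h2
        by_cases hm : kp.2 ∈ p <;> simp [h2', hm, PySem.Dict.ofList, PySem.Dict.update, PySem.Dict.getD, PySem.Dict.get?, PySem.Dict.insert, PySem.Dict.modify, PySem.Dict.contains, PySem.Dict.empty, pvMkSt, PySem.Set.add, PySem.Set.empty] <;> exact hpay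
      by_cases h3 : kp.1 == "CH"
      · have h3' : kp.1 = "CH" := by simpa using h3
        by_cases hm : kp.2 ∈ ch <;> simp [h3', hm, PySem.Dict.ofList, PySem.Dict.update, PySem.Dict.getD, PySem.Dict.get?, PySem.Dict.insert, PySem.Dict.modify, PySem.Dict.contains, PySem.Dict.empty, pvMkSt, PySem.Set.add, PySem.Set.empty] <;> exact hpay
      by_cases h4 : kp.1 == "EV"
      · have h4' : kp.1 = "EV" := by simpa using h4
        by_cases hm : kp.2 ∈ e <;> simp [h4', hm, PySem.Dict.ofList, PySem.Dict.update, PySem.Dict.getD, PySem.Dict.get?, PySem.Dict.insert, PySem.Dict.modify, PySem.Dict.contains, PySem.Dict.empty, pvMkSt, PySem.Set.add, PySem.Set.empty] <;> exact hpay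
      have h1f : (kp.1 == "CL") = false := by simpa using h1
      have h2f : (kp.1 == "PR") = false := by simpa using h2
      have h3f : (kp.1 == "CH") = false := by simpa using h3
      have h4f : (kp.1 == "EV") = false := by simpa using h4
      have n1 : ("CL" == kp.1) = false := by simp at h1f ⊢; exact fun h => h1f h.symm
      have n2 : ("PR" == kp.1) = false := by simp at h2f ⊢; exact fun h => h2f h.symm
      have n3 : ("CH" == kp.1) = false := by simp at h3f ⊢; exact fun h => h3f h.symm
      have n4 : ("EV" == kp.1) = false := by simp at h4f ⊢; exact fun h => h4f h.symm
      by_cases hm : kp.2 ∈ o <;> simp [h1f, h2f, h3f, h4f, n1, n2, n3, n4, hm, PySem.Dict.ofList, PySem.Dict.update, PySem.Dict.getD, PySem.Dict.get?, PySem.Dict.insert, PySem.Dict.modify, PySem.Dict.contains, PySem.Dict.empty, pvMkSt, PySem.Set.add, PySem.Set.empty] <;> exact hpay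

lemma pvParse_name (raw : String) (q : String × String) (h : pvParseEvidenceId raw = some q) :
    q.1 = "claim_ids" ∨ q.1 = "prop_ids" ∨ q.1 = "chunk_ids" ∨ q.1 = "event_ids" ∨ q.1 = "other_ids" := by
  unfold pvParseEvidenceId at h
  dsimp only at h
  generalize hK : (if PySem.Str.isIn ":" (PySem.Str.strip raw) then
      match PySem.Str.splitMax? (PySem.Str.strip raw) ":" 1 with
      | some (pre :: rest :: tail) => (PySem.Str.upper (PySem.Str.strip pre), PySem.Str.strip rest)
      | _ => ("", PySem.Str.strip raw)
    else ("", PySem.Str.strip raw)) = kp at h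
  split_ifs at h with h1 h2
  simp only [Option.some.injEq] at h
  subst h
  simp only [PySem.Dict.ofList, PySem.Dict.update, PySem.Dict.getD, PySem.Dict.get?, PySem.Dict.insert,
    PySem.Dict.contains, PySem.Dict.empty]
  by_cases e1 : ("CL" == kp.1) = true <;> by_cases e2 : ("PR" == kp.1) = true <;>
    by_cases e3 : ("CH" == kp.1) = true <;> by_cases e4 : ("EV" == kp.1) = true <;>
    simp [e1, e2, e3, e4, List.find?]

lemma pv_loop_eq (l : List String) : ∀ c p ch e o,
    l.foldl pvStepA (pvMkSt c p ch e o) =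
      pvMkSt (PySem.Set.update c (pvBp l "claim_ids"))
             (PySem.Set.update p (pvBp l "prop_ids"))
             (PySem.Set.update ch (pvBp l "chunk_ids"))
             (PySem.Set.update e (pvBp l "event_ids"))
             (PySem.Set.update o (pvBp l "other_ids")) := by
  induction l with
  | nil => intro c p ch e o; simp [pvBp, PySem.Set.update]
  | cons r l ih =>
    intro c p ch e o
    rw [List.foldl_cons, pvStepA_eq]
    cases hp : pvParseEvidenceId r with
    | none => rw [ih]; simp [pvBp, List.filterMap_cons, hp]
    | some q =>
      obtain ⟨n, pay⟩ := q
      rcases pvParse_name r (n, pay) hp with h | h | h | h | h <;> subst h <;>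
        simp [ih, pvBp, hp, PySem.Set.update, List.foldl_cons]

-- ===== VERDICT (by name: the statement is the Claim_ definition above) =====
theorem split_prefixed_evidence_ids_py_spec : Claim_equal_split_prefixed_evidence_ids_py := by
  intro ids _
  unfold Spec_split_prefixed_evidence_ids_py
  show split_prefixed_evidence_ids_py ids = _
  unfold split_prefixed_evidence_ids_py split_prefixed_evidence_ids_py_alt
  have h0 : (PySem.Dict.ofList [("claim_ids", ([] : List String)), ("prop_ids", []), ("chunk_ids", []), ("event_ids", []), ("other_ids", [])],
      PySem.Dict.ofList ((PySem.Dict.ofList [("claim_ids", ([] : List String)), ("prop_ids", []), ("chunk_ids", []), ("event_ids", []), ("other_ids", [])]).keys.map (fun k => (k, PySem.Set.empty)))) = pvMkSt [] [] [] [] [] := by decide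
  simp only [h0, pv_loop_eq]
  simp [pvMkSt, pvBp, PySem.Set.update, PySem.List.dedup, PySem.Set.ofList_eq_foldl, List.filterMap_map]
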